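-- pv_equiv track=rewrite | github.com/sdsubhajitdas/Practice-Problems | GeeksforGeeks/replace_0s_with_5.py | convertFive
-- ===== SOURCE A (Python) =====
-- def convertFive(n: int) -> int:
--     copyN = n
--     addExtra = 0
--     decimalPlace = 1
--
--     if(n == 0):
--         return 5
--
--     while(n != 0):
--         if(n % 10 == 0):
--             addExtra += 5*decimalPlace
--         n = n//10
--         decimalPlace *= 10
--
--     return copyN + addExtra
-- ===== SOURCE B (Python) =====
-- def convertFive(n: int) -> int:
--     if n < 10:
--         return 5 if n == 0 else n
--     q, r = divmod(n, 10)
--     return convertFive(q) * 10 + (5 if r == 0 else r)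
-- ===== Notes on version B (the rewrite author's own statement) =====
-- stated objective: simpler
-- what changed: Replaces the iterative scan that accumulates a place-valued correction (copyN + sum of 5*10^i over zero digits, tracking decimalPlace) with a direct recursion that rebuilds the number digit by digit from the most significant side, substituting 5 for each 0 digit; no copy, no correction sum, no place counter.
import Mathlib
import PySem

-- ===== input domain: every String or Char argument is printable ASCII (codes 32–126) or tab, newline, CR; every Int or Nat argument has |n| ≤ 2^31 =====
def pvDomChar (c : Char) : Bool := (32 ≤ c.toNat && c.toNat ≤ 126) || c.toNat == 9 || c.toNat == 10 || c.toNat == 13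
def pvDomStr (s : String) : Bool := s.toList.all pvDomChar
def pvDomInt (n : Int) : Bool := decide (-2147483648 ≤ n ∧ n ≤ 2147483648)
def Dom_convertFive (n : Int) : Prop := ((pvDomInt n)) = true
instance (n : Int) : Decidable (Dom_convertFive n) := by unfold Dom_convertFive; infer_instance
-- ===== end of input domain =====

-- B replaces A's iterative correction-sum (copyN + 5*place per zero digit) with a
-- direct recursion rebuilding the number most-significant-first, substituting 5 for 0.


-- termination helper for both ports' recursions on n // 10 (cited in decreasing_by)
theorem pvFloordivTen_toNat_lt (n : Int) (h : 0 < n) :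
    (PySem.Int.floordiv n 10).toNat < n.toNat := by
  have h1 : PySem.Int.floordiv n 10 < n :=
    (PySem.Int.floordiv_lt_iff_lt_mul (by omega)).mpr (by nlinarith)
  have h2 : 0 ≤ PySem.Int.floordiv n 10 :=
    (PySem.Int.le_floordiv_iff_mul_le (by omega)).mpr (by omega)
  omega

-- ===== PORT A =====
-- the while loop; state (n, addExtra, decimalPlace). Python diverges for n < 0
-- (-1 // 10 == -1), which Pre_ excludes; the `0 < n` guard is A's `n != 0` on Pre_.
def convertFiveLoop (n addExtra decimalPlace : Int) : Int :=
  if h : 0 < n then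
    convertFiveLoop (PySem.Int.floordiv n 10)
      (if PySem.Int.mod n 10 = 0 then addExtra + 5 * decimalPlace else addExtra)
      (decimalPlace * 10)
  else addExtra
termination_by n.toNat
decreasing_by exact pvFloordivTen_toNat_lt n h

def convertFive (n : Int) : Int :=
  if n = 0 then 5
  else n + convertFiveLoop n 0 1   -- copyN + addExtra

-- ===== PORT B =====
def convertFive_alt (n : Int) : Int :=
  if h : n < 10 then (if n = 0 then 5 else n)
  else
    convertFive_alt (PySem.Int.floordiv n 10) * 10 +
      (if PySem.Int.mod n 10 = 0 then 5 else PySem.Int.mod n 10)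
termination_by n.toNat
decreasing_by exact pvFloordivTen_toNat_lt n (by omega)

-- ===== PRECONDITION & SPEC =====
-- Python A never terminates for n < 0 (n // 10 stalls at -1), so only n ≥ 0 is admitted.
def Pre_convertFive (n : Int) : Prop := 0 ≤ n
instance (n : Int) : Decidable (Pre_convertFive n) := by unfold Pre_convertFive; infer_instance
def pvWitness_convertFive : Int := (105)

def Spec_convertFive (n : Int) (out : Int) : Prop := out = convertFive_alt n
instance (n : Int) (out : Int) : Decidable (Spec_convertFive n out) := by
  unfold Spec_convertFive; infer_instance

-- ===== CLAIM (what is proved, stated in full; the proofs are below) =====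
def Claim_equal_convertFive : Prop :=
  ∀ (n : Int), Dom_convertFive n → Pre_convertFive n → Spec_convertFive n (convertFive n)

-- ===== LEMMAS AND PROOFS =====

-- the "correction" A accumulates: 5·10^i for every zero digit of n
def pvExtra (n : Int) : Int :=
  if h : 0 < n then
    (if PySem.Int.mod n 10 = 0 then 5 else 0) + 10 * pvExtra (PySem.Int.floordiv n 10)
  else 0
termination_by n.toNat
decreasing_by exact pvFloordivTen_toNat_lt n h

theorem pvLoop_eq (k : Nat) : ∀ (n addExtra dp : Int), 0 ≤ n → n.toNat ≤ k →
    convertFiveLoop n addExtra dp = addExtra + dp * pvExtra n := by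
  induction k with
  | zero =>
    intro n a dp h0 hk
    have hn : n = 0 := by omega
    subst hn
    rw [convertFiveLoop, pvExtra]; simp
  | succ k ih =>
    intro n a dp h0 hk
    rw [convertFiveLoop, pvExtra]
    by_cases h : 0 < n
    · simp only [dif_pos h]
      have hq0 : 0 ≤ PySem.Int.floordiv n 10 :=
        (PySem.Int.le_floordiv_iff_mul_le (by omega)).mpr (by omega)
      have hqk : (PySem.Int.floordiv n 10).toNat ≤ k := by
        have := pvFloordivTen_toNat_lt n h; omega
      rw [ih _ _ _ hq0 hqk]
      split_ifs <;> ring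
    · simp [h]

theorem pvAlt_eq (k : Nat) : ∀ (n : Int), 0 < n → n.toNat ≤ k →
    convertFive_alt n = n + pvExtra n := by
  induction k with
  | zero => intro n h0 hk; omega
  | succ k ih =>
    intro n h0 hk
    have hd : PySem.Int.floordiv n 10 = n / 10 := by
      simp [PySem.Int.floordiv, Int.fdiv_eq_ediv_of_nonneg _ (by omega : (0:Int) ≤ 10)]
    have hm : PySem.Int.mod n 10 = n % 10 := by
      simp [PySem.Int.mod, Int.fmod_eq_emod]
    rw [convertFive_alt, pvExtra]
    simp only [dif_pos h0, hd, hm]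
    by_cases hlt : n < 10
    · -- single digit: n % 10 = n ≠ 0, n / 10 = 0
      have h10 : n / 10 = 0 := by omega
      have hm10 : n % 10 = n := by omega
      have hne : ¬ n = 0 := by omega
      rw [dif_pos hlt, if_neg hne, hm10, h10, pvExtra]
      simp [hne]
    · have hq1 : 0 < n / 10 := by omega
      have hqk : (n / 10).toNat ≤ k := by
        have := pvFloordivTen_toNat_lt n h0; rw [hd] at this; omega
      rw [dif_neg hlt, ih _ hq1 hqk]
      by_cases hz : n % 10 = 0 <;> simp only [hz, reduceIte] <;> omega

-- ===== VERDICT (by name: the statement is the Claim_ definition above) =====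
theorem convertFive_spec : Claim_equal_convertFive := by
  intro n _ hpre
  unfold Spec_convertFive convertFive
  by_cases h0 : n = 0
  · subst h0; rw [convertFive_alt]; simp
  · have hpos : 0 < n := by unfold Pre_convertFive at hpre; omega
    rw [if_neg h0, pvLoop_eq n.toNat n 0 1 (by omega) le_rfl,
      pvAlt_eq n.toNat n hpos le_rfl]
    ring
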